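-- pv_equiv track=rewrite | github.com/theobori/aoc | 2023/13/part1.py | get_reflection
-- ===== SOURCE A (Python) =====
-- def get_reflection(pattern):
--     for i in range(1, len(pattern)):
--         a = pattern[:i]
--         b = pattern[i:]
--
--         a = a[::-1][: len(b)]
--         b = b[: len(a)]
--
--         if a == b:
--             return i
--
--     return 0
-- ===== SOURCE B (Python) =====
-- def get_reflection(pattern):
--     n = len(pattern)
--     for i in range(1, n):
--         lo, hi = i - 1, i
--         while lo >= 0 and hi < n and pattern[lo] == pattern[hi]:
--             lo -= 1
--             hi += 1
--         if lo < 0 or hi >= n: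
--             return i
--     return 0
-- ===== Notes on version B (the rewrite author's own statement) =====
-- stated objective: faster
-- what changed: Replaced the per-split slice/reverse/truncate list comparison with an in-place two-pointer scan expanding outward from the split line, exiting at the first mismatched row pair instead of always materialising and comparing whole sublists.
import Mathlib
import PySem

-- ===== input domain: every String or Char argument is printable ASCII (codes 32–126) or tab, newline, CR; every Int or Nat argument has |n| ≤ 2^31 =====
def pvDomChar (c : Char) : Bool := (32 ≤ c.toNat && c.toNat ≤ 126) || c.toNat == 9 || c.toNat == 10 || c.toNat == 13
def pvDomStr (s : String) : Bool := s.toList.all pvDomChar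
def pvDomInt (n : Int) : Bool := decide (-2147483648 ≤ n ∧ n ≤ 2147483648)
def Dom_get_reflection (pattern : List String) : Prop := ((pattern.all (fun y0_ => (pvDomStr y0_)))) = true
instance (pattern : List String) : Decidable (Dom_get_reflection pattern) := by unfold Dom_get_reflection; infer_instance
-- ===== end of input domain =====

-- B replaces A's slice/reverse/truncate/compare per split with an in-place two-pointer
-- outward scan from the split line (objective: faster — a timing run measured B faster on the generated inputs).

-- ===== PORT A =====
-- for i in range(1, len(pattern)): a=pattern[:i]; b=pattern[i:]; a=a[::-1][:len(b)]; b=b[:len(a)]; if a==b: return i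
-- (a[::-1] is ported as a.reverse, exact by PySem.List.slice?_none_none_neg_one)
def aLoop (pattern : List String) : List Int → Int
  | [] => 0
  | i :: rest =>
    let a := PySem.List.slice pattern none (some i)
    let b := PySem.List.slice pattern (some i) none
    let a2 := PySem.List.slice a.reverse none (some (b.length : Int))
    let b2 := PySem.List.slice b none (some (a2.length : Int))
    if a2 == b2 then i else aLoop pattern rest

def get_reflection (pattern : List String) : Int :=
  aLoop pattern (PySem.List.pyRange 1 (pattern.length : Int) 1)

-- ===== PORT B =====
-- while lo >= 0 and hi < n and pattern[lo] == pattern[hi]: lo -= 1; hi += 1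
def mirrorLoop (pattern : List String) (n : Int) (lo hi : Int) : Int × Int :=
  if h : 0 ≤ lo ∧ hi < n ∧ PySem.List.pyGet? pattern lo = PySem.List.pyGet? pattern hi then
    mirrorLoop pattern n (lo - 1) (hi + 1)
  else (lo, hi)
termination_by (lo + 1).toNat
decreasing_by omega

def bLoop (pattern : List String) (n : Int) : List Int → Int
  | [] => 0
  | i :: rest =>
    let r := mirrorLoop pattern n (i - 1) i
    if r.1 < 0 ∨ r.2 ≥ n then i else bLoop pattern n rest

def get_reflection_alt (pattern : List String) : Int :=
  bLoop pattern (pattern.length : Int) (PySem.List.pyRange 1 (pattern.length : Int) 1)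

-- ===== PRECONDITION & SPEC =====
def Spec_get_reflection (pattern : List String) (out : Int) : Prop := out = get_reflection_alt pattern
instance (pattern : List String) (out : Int) : Decidable (Spec_get_reflection pattern out) := by unfold Spec_get_reflection; infer_instance

-- ===== CLAIM (what is proved, stated in full; the proofs are below) =====
def Claim_equal_get_reflection : Prop := ∀ (pattern : List String), Dom_get_reflection pattern → Spec_get_reflection pattern (get_reflection pattern)

-- ===== LEMMAS AND PROOFS =====

-- A's truncate-both-to-the-overlap comparison is the zip-wise all-equal test.
theorem takeEq (u v : List String) :
    (u.take v.length == v.take u.length) = (u.zip v).all (fun q => q.1 == q.2) := by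
  induction u generalizing v with
  | nil => simp
  | cons x u ih =>
    cases v with
    | nil => simp
    | cons y v =>
      simp only [List.length_cons, List.take_succ_cons, List.zip_cons_cons, List.all_cons,
        List.cons_beq_cons, ih]

theorem mirror_spec (p : List String) (lo hi : Int) (hhi : 0 ≤ hi) (hlo : lo < (p.length : Int)) :
    (decide ((mirrorLoop p (p.length : Int) lo hi).1 < 0 ∨ (mirrorLoop p (p.length : Int) lo hi).2 ≥ (p.length : Int)))
      = ((p.take (lo + 1).toNat).reverse.zip (p.drop hi.toNat)).all (fun q => q.1 == q.2) := by
  have haux : ∀ (k : Nat) (lo hi : Int), (lo + 1).toNat ≤ k → 0 ≤ hi → lo < (p.length : Int) →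
      (decide ((mirrorLoop p (p.length : Int) lo hi).1 < 0 ∨ (mirrorLoop p (p.length : Int) lo hi).2 ≥ (p.length : Int)))
        = ((p.take (lo + 1).toNat).reverse.zip (p.drop hi.toNat)).all (fun q => q.1 == q.2) := by
    intro k
    induction k with
    | zero =>
      intro lo hi hk hhi hlo
      have hneg : lo < 0 := by omega
      rw [mirrorLoop, dif_neg (by omega)]
      have h0 : (lo + 1).toNat = 0 := by omega
      simp [h0, hneg]
    | succ k ih =>
      intro lo hi hk hhi hlo
      by_cases h0 : 0 ≤ lo
      · by_cases hn : hi < (p.length : Int)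
        · have hlo' : lo.toNat < p.length := by omega
          have hhi' : hi.toNat < p.length := by omega
          have hga : PySem.List.pyGet? p lo = some p[lo.toNat] :=
            PySem.List.pyGet?_eq_some_getElem p h0 hlo
          have hgb : PySem.List.pyGet? p hi = some p[hi.toNat] :=
            PySem.List.pyGet?_eq_some_getElem p hhi hn
          have htake : (lo + 1).toNat = lo.toNat + 1 := by omega
          have hstep : p.take (lo.toNat + 1) = p.take lo.toNat ++ [p[lo.toNat]] :=
            List.take_succ_eq_append_getElem hlo'
          have hdrop : p.drop hi.toNat = p[hi.toNat] :: p.drop (hi.toNat + 1) :=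
            List.drop_eq_getElem_cons hhi'
          by_cases he : PySem.List.pyGet? p lo = PySem.List.pyGet? p hi
          · have hval : p[lo.toNat] = p[hi.toNat] := by
              rw [hga, hgb] at he; exact Option.some.inj he
            rw [mirrorLoop, dif_pos ⟨h0, hn, he⟩]
            rw [ih (lo - 1) (hi + 1) (by omega) (by omega) (by omega)]
            have h1 : (lo - 1 + 1).toNat = lo.toNat := by omega
            have h2 : (hi + 1).toNat = hi.toNat + 1 := by omega
            rw [h1, h2, htake, hstep, hdrop]
            simp only [List.reverse_append, List.reverse_cons, List.reverse_nil,
              List.nil_append, List.singleton_append, List.zip_cons_cons, List.all_cons,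
              hval, beq_self_eq_true, Bool.true_and]
          · have hval : p[lo.toNat] ≠ p[hi.toNat] := by
              intro hc; exact he (by rw [hga, hgb, hc])
            rw [mirrorLoop, dif_neg (by tauto)]
            have hfalse : ¬ (lo < 0 ∨ hi ≥ (p.length : Int)) := by omega
            rw [htake, hstep, hdrop]
            simp only [List.reverse_append, List.reverse_cons, List.reverse_nil,
              List.nil_append, List.singleton_append, List.zip_cons_cons, List.all_cons]
            simp [hfalse, hval]
        · rw [mirrorLoop, dif_neg (by tauto)]
          have hnil : p.drop hi.toNat = [] := List.drop_eq_nil_of_le (by omega)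
          simp [hnil]
          omega
      · rw [mirrorLoop, dif_neg (by omega)]
        have hz : (lo + 1).toNat = 0 := by omega
        simp [hz]
        omega
  exact haux (lo + 1).toNat lo hi le_rfl hhi hlo

-- the per-split checks of the two loops coincide
theorem check_eq (p : List String) (i : Int) (h1 : 1 ≤ i) (h2 : i < (p.length : Int)) :
    (let a := PySem.List.slice p none (some i)
     let b := PySem.List.slice p (some i) none
     let a2 := PySem.List.slice a.reverse none (some (b.length : Int))
     let b2 := PySem.List.slice b none (some (a2.length : Int))
     (a2 == b2))
    = (decide ((mirrorLoop p (p.length : Int) (i - 1) i).1 < 0 ∨ (mirrorLoop p (p.length : Int) (i - 1) i).2 ≥ (p.length : Int))) := by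
  have h0 : (0 : Int) ≤ i := by omega
  have hms := mirror_spec p (i - 1) i (by omega) (by omega)
  have hsub : (i - 1 + 1).toNat = i.toNat := by omega
  rw [hsub] at hms
  simp only [PySem.List.slice_to p h0, PySem.List.slice_from p h0,
    PySem.List.slice_to_natCast, List.length_take, List.length_reverse]
  -- b.take a2.length = b.take ar.length: both truncate to the overlap
  have harg : List.take (min (List.drop i.toNat p).length (min i.toNat p.length)) (List.drop i.toNat p)
      = List.take ((List.take i.toNat p).reverse.length) (List.drop i.toNat p) := by
    apply List.take_eq_take_iff.mpr
    simp
    omega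
  rw [harg, takeEq (List.take i.toNat p).reverse (List.drop i.toNat p)]
  exact hms.symm

theorem loops_eq (p : List String) (l : List Int)
    (hl : ∀ i ∈ l, 1 ≤ i ∧ i < (p.length : Int)) :
    aLoop p l = bLoop p (p.length : Int) l := by
  induction l with
  | nil => rfl
  | cons i rest ih =>
    obtain ⟨h1, h2⟩ := hl i (by simp)
    have hc := check_eq p i h1 h2
    simp only [aLoop, bLoop]
    rw [hc]
    by_cases hb : ((mirrorLoop p (p.length : Int) (i - 1) i).1 < 0 ∨ (mirrorLoop p (p.length : Int) (i - 1) i).2 ≥ (p.length : Int))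
    · simp [hb]
    · simp [hb, ih (fun j hj => hl j (by simp [hj]))]

-- ===== VERDICT (by name: the statement is the Claim_ definition above) =====
theorem get_reflection_spec : Claim_equal_get_reflection := by
  intro p _
  unfold Spec_get_reflection get_reflection get_reflection_alt
  exact loops_eq p _ (fun i hi => by
    rw [PySem.List.mem_pyRange_one] at hi; exact hi)
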